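-- pv_equiv track=rewrite | github.com/SaiSudhaV/coding_platforms | possiblePairCount.py | possiblePairsCount
-- ===== SOURCE A (Python) =====
-- def possiblePairsCount(ar1, n1, ar2, n2):
--     count = 0
--     for i in ar1:
--         for j in ar2:
--             if i - j in range(-1, 2) :
--                 ar2.remove(j)
--                 count += 1
--                 break
--     return count
-- ===== SOURCE B (Python) =====
-- # Bucket-index greedy: one dict of per-value index stacks replaces A's inner scan
-- # of ar2 (and its O(n2) list.remove); B does not mutate ar2 (A empties matched
-- # elements out of it) -- the return value is identical.
-- def possiblePairsCount(ar1, n1, ar2, n2):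
--     idx = {}
--     for k in range(len(ar2) - 1, -1, -1):
--         idx.setdefault(ar2[k], []).append(k)
--     # each bucket holds its indices in decreasing order, so the smallest
--     # remaining index of a value is at the end and pops in O(1)
--     count = 0
--     for i in ar1:
--         found = False
--         best_k = -1
--         best_v = 0
--         for v in (i - 1, i, i + 1):
--             q = idx.get(v)
--             if q:
--                 k = q[-1]
--                 if not found or k < best_k:
--                     found = True
--                     best_k = k
--                     best_v = v
--         if found:
--             idx[best_v].pop()
--             count += 1
--     return count
-- ===== Notes on version B (the rewrite author's own statement) =====
-- stated objective: faster
-- what changed: Instead of scanning the remaining ar2 (and paying list.remove) for every element of ar1, B builds one dict mapping each value to a stack of its indices in ar2 and, per element i, picks the smallest remaining index among the buckets of i-1, i and i+1 in O(1); B also does not mutate ar2.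
import Mathlib
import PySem

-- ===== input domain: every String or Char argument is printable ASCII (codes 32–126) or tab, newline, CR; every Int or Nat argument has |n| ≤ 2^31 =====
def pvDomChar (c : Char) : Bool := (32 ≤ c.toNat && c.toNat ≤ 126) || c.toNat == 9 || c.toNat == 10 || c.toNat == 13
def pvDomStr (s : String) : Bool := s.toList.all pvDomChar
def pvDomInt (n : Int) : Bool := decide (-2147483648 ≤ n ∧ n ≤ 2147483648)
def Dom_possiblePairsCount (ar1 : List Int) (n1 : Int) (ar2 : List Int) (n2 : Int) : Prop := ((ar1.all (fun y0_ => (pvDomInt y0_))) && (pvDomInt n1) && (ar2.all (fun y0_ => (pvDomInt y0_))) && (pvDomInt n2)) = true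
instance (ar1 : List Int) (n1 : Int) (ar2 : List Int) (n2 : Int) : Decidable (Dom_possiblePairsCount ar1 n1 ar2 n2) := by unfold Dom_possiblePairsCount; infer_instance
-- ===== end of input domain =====

-- B replaces A's repeated inner scan of ar2 (and its list.remove) by a dict of per-value
-- index stacks built once (objective: faster). A empties matched elements out of ar2 in
-- place; B does not mutate ar2 — the equivalence proved here is about the RETURN value.

-- ===== PORT A =====
-- 'i - j in range(-1, 2)'
def pvCondA (i j : Int) : Bool := (PySem.List.pyRange (-1) 2 1).contains (i - j)

-- the inner 'for j in ar2: if …: break' loop, returning the j it breaks on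
def pvFindJ (i : Int) : List Int → Option Int
  | [] => none
  | j :: rest => if pvCondA i j then some j else pvFindJ i rest

def pvStepA (st : Int × List Int) (i : Int) : Int × List Int :=
  match pvFindJ i st.2 with
  | some j =>
      match PySem.List.remove? st.2 j with
      | some l => (st.1 + 1, l)
      | none => (st.1 + 1, st.2)
  | none => st

def possiblePairsCount (ar1 : List Int) (n1 : Int) (ar2 : List Int) (n2 : Int) : Int :=
  (ar1.foldl pvStepA (0, ar2)).1

-- ===== PORT B =====
-- one iteration of 'for v in (i - 1, i, i + 1)' over the state (found, best_k, best_v);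
-- 'if q: k = q[-1]' is the pyGet? q (-1) match (none exactly when q is empty)
def pvSelB (d : PySem.Dict Int (List Int)) (st : Bool × Int × Int) (v : Int) : Bool × Int × Int :=
  match d.get? v with
  | some q =>
      match PySem.List.pyGet? q (-1) with
      | some k => if !st.1 || decide (k < st.2.1) then (true, k, v) else st
      | none => st
  | none => st

-- 'idx[best_v].pop()'
def pvPopLast (q : List Int) : List Int :=
  match PySem.List.pop? q (-1) with
  | some r => r.2
  | none => q

def pvStepB (st : Int × PySem.Dict Int (List Int)) (i : Int) : Int × PySem.Dict Int (List Int) :=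
  let r := [i - 1, i, i + 1].foldl (pvSelB st.2) (false, -1, 0)
  if r.1 then (st.1 + 1, st.2.modify r.2.2 [] pvPopLast) else st

-- 'for k in range(len(ar2)-1, -1, -1): idx.setdefault(ar2[k], []).append(k)'
-- (the index k drawn from the range is always in range, so the pyGetD default is never read)
def pvBuild (ar2 : List Int) : PySem.Dict Int (List Int) :=
  (PySem.List.pyRange ((ar2.length : Int) - 1) (-1) (-1)).foldl
    (fun d k => d.modify (PySem.List.pyGetD ar2 k 0) [] (· ++ [k])) PySem.Dict.empty

def possiblePairsCount_alt (ar1 : List Int) (n1 : Int) (ar2 : List Int) (n2 : Int) : Int :=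
  (ar1.foldl pvStepB (0, pvBuild ar2)).1

-- ===== PRECONDITION & SPEC =====
def Spec_possiblePairsCount (ar1 : List Int) (n1 : Int) (ar2 : List Int) (n2 : Int) (out : Int) : Prop := out = possiblePairsCount_alt ar1 n1 ar2 n2
instance (ar1 : List Int) (n1 : Int) (ar2 : List Int) (n2 : Int) (out : Int) : Decidable (Spec_possiblePairsCount ar1 n1 ar2 n2 out) := by unfold Spec_possiblePairsCount; infer_instance

-- ===== CLAIM (what is proved, stated in full; the proofs are below) =====
def Claim_equal_possiblePairsCount : Prop := ∀ (ar1 : List Int) (n1 : Int) (ar2 : List Int) (n2 : Int), Dom_possiblePairsCount ar1 n1 ar2 n2 → Spec_possiblePairsCount ar1 n1 ar2 n2 (possiblePairsCount ar1 n1 ar2 n2)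

-- ===== LEMMAS AND PROOFS =====
-- Proof plan: the remaining state of A's ar2 is abstracted as a list P of
-- (original index, value) pairs with strictly increasing indices; B's dict maps each
-- value v to the indices of the remaining pairs carrying v, largest first (pvBucket /
-- pvInv).  A's inner loop removes the first remaining element within 1 of i; B pops the
-- bucket whose top index is smallest among values i-1, i, i+1 — the same pair (pvSel_result).

-- the bucket of value v for a remaining (index, value) pair list P: its indices, largest first
def pvBucket (P : List (Int × Int)) (v : Int) : List Int :=
  ((P.filter (fun p => p.2 == v)).map (·.1)).reverse

-- selection step rephrased on the pair list

def pvInv (P : List (Int × Int)) (d : PySem.Dict Int (List Int)) : Prop :=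
  ∀ v, d.getD v [] = pvBucket P v

def pvSelStep (P : List (Int × Int)) (st : Bool × Int × Int) (v : Int) : Bool × Int × Int :=
  match ((P.filter (fun p => p.2 == v)).map (·.1)).head? with
  | some k => if !st.1 || decide (k < st.2.1) then (true, k, v) else st
  | none => st

lemma pvCondA_iff (i j : Int) : pvCondA i j = true ↔ (j = i - 1 ∨ j = i ∨ j = i + 1) := by
  have h : PySem.List.pyRange (-1) 2 1 = [-1, 0, 1] := by decide
  simp [pvCondA, h]; omega

-- filter of the prefix that contains no near value is empty at a near value

lemma pvFilter_prefix_nil (i v : Int) (P : List (Int × Int))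
    (hv : pvCondA i v = true) (h : ∀ p ∈ P, pvCondA i p.2 = false) :
    P.filter (fun p => p.2 == v) = [] := by
  rw [List.filter_eq_nil_iff]
  intro p hp hbe
  have h2 : p.2 = v := by simpa using hbe
  have h3 := h p hp
  rw [h2, hv] at h3
  cases h3

lemma pvRemove_decomp (i j : Int) (L₁ L₂ : List Int)
    (h₁ : ∀ x ∈ L₁, pvCondA i x = false) (hj : pvCondA i j = true) :
    PySem.List.remove? (L₁ ++ j :: L₂) j = some (L₁ ++ L₂) := by
  induction L₁ with
  | nil => simp [PySem.List.remove?_cons_self]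
  | cons x t ih =>
    have hx : x ≠ j := by
      intro he; have := h₁ x (by simp); rw [he] at this; rw [this] at hj; cases hj
    rw [List.cons_append, PySem.List.remove?_cons_of_ne _ hx,
        ih (fun y hy => h₁ y (by simp [hy]))]
    rfl

lemma pvHead_self (i : Int) (P₁ P₂ : List (Int × Int)) (p : Int × Int)
    (h₁ : ∀ q ∈ P₁, pvCondA i q.2 = false) (hp : pvCondA i p.2 = true) :
    (((P₁ ++ p :: P₂).filter (fun q => q.2 == p.2)).map (·.1)).head? = some p.1 := by
  rw [List.filter_append, pvFilter_prefix_nil i p.2 P₁ hp h₁]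
  simp

lemma pvHead_other (i : Int) (P₁ P₂ : List (Int × Int)) (p : Int × Int)
    (h₁ : ∀ q ∈ P₁, pvCondA i q.2 = false) (hpw : (P₁ ++ p :: P₂).Pairwise (fun a b => a.1 < b.1))
    (v : Int) (hv : pvCondA i v = true) (hne : v ≠ p.2) (k : Int)
    (hk : (((P₁ ++ p :: P₂).filter (fun q => q.2 == v)).map (·.1)).head? = some k) : p.1 < k := by
  rw [List.filter_append, pvFilter_prefix_nil i v P₁ hv h₁, List.nil_append,
      List.filter_cons_of_neg (by simpa using fun h => hne h.symm)] at hk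
  have hmem : k ∈ (P₂.filter (fun q => q.2 == v)).map (·.1) := by
    cases hh : ((P₂.filter (fun q => q.2 == v)).map (·.1)) with
    | nil => rw [hh] at hk; cases hk
    | cons a t => rw [hh] at hk; simp at hk; simp [hk]
  obtain ⟨q, hq, hq1⟩ := List.mem_map.1 hmem
  have hq2 : q ∈ P₂ := List.mem_of_mem_filter hq
  have hlt : ∀ q ∈ P₂, p.1 < q.1 :=
    (List.pairwise_cons.1 (List.pairwise_append.1 hpw).2.1).1
  rw [← hq1]; exact hlt q hq2

lemma pvSelStep_star (i : Int) (P₁ P₂ : List (Int × Int)) (p : Int × Int)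
    (h₁ : ∀ q ∈ P₁, pvCondA i q.2 = false) (hp : pvCondA i p.2 = true)
    (st : Bool × Int × Int) (hst : st.1 = false ∨ p.1 < st.2.1) :
    pvSelStep (P₁ ++ p :: P₂) st p.2 = (true, p.1, p.2) := by
  unfold pvSelStep
  rw [pvHead_self i P₁ P₂ p h₁ hp]
  have : (!st.1 || decide (p.1 < st.2.1)) = true := by
    rcases hst with h | h <;> simp [h]
  simp [this]

lemma pvSelStep_other_Q (i : Int) (P₁ P₂ : List (Int × Int)) (p : Int × Int)
    (h₁ : ∀ q ∈ P₁, pvCondA i q.2 = false)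
    (hpw : (P₁ ++ p :: P₂).Pairwise (fun a b => a.1 < b.1))
    (v : Int) (hv : pvCondA i v = true) (hne : v ≠ p.2)
    (st : Bool × Int × Int) (hst : st.1 = false ∨ p.1 < st.2.1) :
    (pvSelStep (P₁ ++ p :: P₂) st v).1 = false ∨ p.1 < (pvSelStep (P₁ ++ p :: P₂) st v).2.1 := by
  unfold pvSelStep
  cases hh : (((P₁ ++ p :: P₂).filter (fun q => q.2 == v)).map (·.1)).head? with
  | none => simpa using hst
  | some k =>
    have hk := pvHead_other i P₁ P₂ p h₁ hpw v hv hne k hh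
    simp only []
    split
    · right; simpa using hk
    · simpa using hst

lemma pvSelStep_keep_star (i : Int) (P₁ P₂ : List (Int × Int)) (p : Int × Int)
    (h₁ : ∀ q ∈ P₁, pvCondA i q.2 = false)
    (hpw : (P₁ ++ p :: P₂).Pairwise (fun a b => a.1 < b.1))
    (v : Int) (hv : pvCondA i v = true) (hne : v ≠ p.2) :
    pvSelStep (P₁ ++ p :: P₂) (true, p.1, p.2) v = (true, p.1, p.2) := by
  unfold pvSelStep
  cases hh : (((P₁ ++ p :: P₂).filter (fun q => q.2 == v)).map (·.1)).head? with
  | none => rfl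
  | some k =>
    have hk := pvHead_other i P₁ P₂ p h₁ hpw v hv hne k hh
    simp
    intro hlt
    exact absurd hlt (by omega)

lemma pvSel_result (i : Int) (P₁ P₂ : List (Int × Int)) (p : Int × Int)
    (h₁ : ∀ q ∈ P₁, pvCondA i q.2 = false) (hp : pvCondA i p.2 = true)
    (hpw : (P₁ ++ p :: P₂).Pairwise (fun a b => a.1 < b.1)) :
    [i - 1, i, i + 1].foldl (pvSelStep (P₁ ++ p :: P₂)) (false, -1, 0) = (true, p.1, p.2) := by
  have Q0 : ((false, -1, 0) : Bool × Int × Int).1 = false ∨ p.1 < ((false, -1, 0) : Bool × Int × Int).2.1 := Or.inl rfl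
  simp only [List.foldl_cons, List.foldl_nil]
  rcases (pvCondA_iff i p.2).1 hp with h | h | h
  · have hi : i = p.2 + 1 := by omega
    subst hi
    have e1 : p.2 + 1 - 1 = p.2 := by ring
    rw [e1, pvSelStep_star _ P₁ P₂ p h₁ hp _ Q0,
       pvSelStep_keep_star _ P₁ P₂ p h₁ hpw _ ((pvCondA_iff _ _).2 (by omega)) (by omega),
       pvSelStep_keep_star _ P₁ P₂ p h₁ hpw _ ((pvCondA_iff _ _).2 (by omega)) (by omega)]
  · have hi : i = p.2 := h.symm
    subst hi
    have Q1 := pvSelStep_other_Q _ P₁ P₂ p h₁ hpw (p.2 - 1) ((pvCondA_iff _ _).2 (by omega)) (by omega) _ Q0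
    rw [pvSelStep_star _ P₁ P₂ p h₁ hp _ Q1,
       pvSelStep_keep_star _ P₁ P₂ p h₁ hpw _ ((pvCondA_iff _ _).2 (by omega)) (by omega)]
  · have hi : i = p.2 - 1 := by omega
    subst hi
    have Q1 := pvSelStep_other_Q _ P₁ P₂ p h₁ hpw (p.2 - 1 - 1) ((pvCondA_iff _ _).2 (by omega)) (by omega) _ Q0
    have Q2 := pvSelStep_other_Q _ P₁ P₂ p h₁ hpw (p.2 - 1) ((pvCondA_iff _ _).2 (by omega)) (by omega) _ Q1
    have e1 : p.2 - 1 + 1 = p.2 := by ring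
    rw [e1, pvSelStep_star _ P₁ P₂ p h₁ hp _ Q2]

lemma pvFindJ_eq_find? (i : Int) (L : List Int) : pvFindJ i L = L.find? (pvCondA i) := by
  induction L with
  | nil => rfl
  | cons x t ih => simp [pvFindJ, List.find?]; split <;> simp_all

lemma pvPyGet_neg_one_reverse (m : List Int) : PySem.List.pyGet? m.reverse (-1) = m.head? := by
  cases m with
  | nil => rfl
  | cons a t =>
    rw [List.reverse_cons]
    simp [PySem.List.pyGet?_neg_one_append_singleton]

lemma pvSelB_eq_selStep (d : PySem.Dict Int (List Int)) (P : List (Int × Int))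
    (hinv : pvInv P d) (st : Bool × Int × Int) (v : Int) :
    pvSelB d st v = pvSelStep P st v := by
  have hb : d.getD v [] = pvBucket P v := hinv v
  unfold pvSelB pvSelStep
  cases hg : d.get? v with
  | none =>
    have h0 : pvBucket P v = [] := by
      rw [← hb, PySem.Dict.getD_eq_get?_getD, hg]; rfl
    have : ((P.filter (fun q => q.2 == v)).map (·.1)) = [] := by
      have := congrArg List.reverse h0
      simpa [pvBucket] using this
    rw [this]
    rfl
  | some q =>
    have hq : q = pvBucket P v := by
      rw [← hb, PySem.Dict.getD_eq_get?_getD, hg]; rfl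
    simp only [hq, pvBucket, pvPyGet_neg_one_reverse]

lemma pvSelStep_nil (P : List (Int × Int)) (st : Bool × Int × Int) (v : Int)
    (h : P.filter (fun q => q.2 == v) = []) : pvSelStep P st v = st := by
  unfold pvSelStep
  rw [h]
  rfl

lemma pvSel_nosat (i : Int) (P : List (Int × Int))
    (h : ∀ p ∈ P, pvCondA i p.2 = false) :
    [i - 1, i, i + 1].foldl (pvSelStep P) (false, -1, 0) = (false, -1, 0) := by
  simp only [List.foldl_cons, List.foldl_nil]
  rw [pvSelStep_nil P _ _ (pvFilter_prefix_nil i _ P ((pvCondA_iff i _).2 (by omega)) h),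
      pvSelStep_nil P _ _ (pvFilter_prefix_nil i _ P ((pvCondA_iff i _).2 (by omega)) h),
      pvSelStep_nil P _ _ (pvFilter_prefix_nil i _ P ((pvCondA_iff i _).2 (by omega)) h)]

lemma pvInv_modify (i : Int) (P₁ P₂ : List (Int × Int)) (p : Int × Int)
    (d : PySem.Dict Int (List Int)) (hinv : pvInv (P₁ ++ p :: P₂) d)
    (h₁ : ∀ q ∈ P₁, pvCondA i q.2 = false) (hp : pvCondA i p.2 = true) :
    pvInv (P₁ ++ P₂) (d.modify p.2 [] pvPopLast) := by
  intro v
  rw [PySem.Dict.getD_modify]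
  by_cases hv : v = p.2
  · subst hv
    rw [if_pos rfl, hinv p.2]
    unfold pvBucket pvPopLast
    rw [List.filter_append, List.filter_append,
        pvFilter_prefix_nil i p.2 P₁ hp h₁, List.nil_append, List.nil_append,
        List.filter_cons_of_pos (by simp)]
    simp [PySem.List.pop?_last]
  · rw [if_neg hv, hinv v]
    unfold pvBucket
    rw [List.filter_append, List.filter_append,
        List.filter_cons_of_neg (by simpa using fun h => hv h.symm)]

lemma pvRun (ar1 : List Int) : ∀ (c : Int) (P : List (Int × Int)) (d : PySem.Dict Int (List Int)),
    P.Pairwise (fun a b => a.1 < b.1) → pvInv P d →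
    (ar1.foldl pvStepB (c, d)).1 = (ar1.foldl pvStepA (c, P.map (·.2))).1 := by
  induction ar1 with
  | nil => intro c P d _ _; rfl
  | cons i t ih =>
    intro c P d hpw hinv
    simp only [List.foldl_cons]
    have hfun : pvSelB d = pvSelStep P :=
      funext fun st => funext fun v => pvSelB_eq_selStep d P hinv st v
    cases hf : P.find? (fun q => pvCondA i q.2) with
    | none =>
      have hnos : ∀ p ∈ P, pvCondA i p.2 = false := by
        intro p hp
        have := List.find?_eq_none.1 hf p hp
        simpa using this
      have hA : pvStepA (c, P.map (·.2)) i = (c, P.map (·.2)) := by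
        unfold pvStepA
        have : pvFindJ i (P.map (·.2)) = none := by
          rw [pvFindJ_eq_find?, List.find?_map]
          rw [show ((pvCondA i) ∘ (·.2) : Int × Int → Bool) = fun q => pvCondA i q.2 from rfl, hf]
          rfl
        rw [this]
      have hB : pvStepB (c, d) i = (c, d) := by
        unfold pvStepB
        simp only [hfun, pvSel_nosat i P hnos]
        simp
      rw [hA, hB]
      exact ih c P d hpw hinv
    | some p =>
      obtain ⟨hp, P₁, P₂, hP, h₁'⟩ := List.find?_eq_some_iff_append.1 hf
      subst hP
      have h₁ : ∀ q ∈ P₁, pvCondA i q.2 = false := by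
        intro q hq
        have := h₁' q hq
        simpa using this
      have hA : pvStepA (c, (P₁ ++ p :: P₂).map (·.2)) i = (c + 1, (P₁ ++ P₂).map (·.2)) := by
        unfold pvStepA
        have hfj : pvFindJ i ((P₁ ++ p :: P₂).map (·.2)) = some p.2 := by
          rw [pvFindJ_eq_find?, List.find?_map]
          rw [show ((pvCondA i) ∘ (·.2) : Int × Int → Bool) = fun q => pvCondA i q.2 from rfl, hf]
          rfl
        rw [hfj]
        have hrem : PySem.List.remove? (P₁.map (·.2) ++ p.2 :: P₂.map (·.2)) p.2
            = some (P₁.map (·.2) ++ P₂.map (·.2)) :=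
          pvRemove_decomp i p.2 (P₁.map (·.2)) (P₂.map (·.2))
            (by intro x hx; obtain ⟨q, hq, rfl⟩ := List.mem_map.1 hx; exact h₁ q hq) hp
        simp [hrem]
      have hB : pvStepB (c, d) i = (c + 1, d.modify p.2 [] pvPopLast) := by
        unfold pvStepB
        simp only [hfun, pvSel_result i P₁ P₂ p h₁ hp hpw]
        simp
      rw [hA, hB]
      exact ih (c + 1) (P₁ ++ P₂) _
        (hpw.sublist ((P₂.sublist_cons_self p).append_left P₁))
        (pvInv_modify i P₁ P₂ p d hinv h₁ hp)

lemma pvInv_build (ar2 : List Int) : pvInv (PySem.List.enumerate ar2) (pvBuild ar2) := by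
  intro v
  unfold pvBuild
  have key : List.foldl (fun d k => d.modify (PySem.List.pyGetD ar2 k 0) [] (· ++ [k]))
      PySem.Dict.empty (PySem.List.pyRange ((ar2.length : Int) - 1) (-1) (-1))
      = List.foldl (fun d (p : Int × Int) => d.modify p.1 [] (· ++ [p.2])) PySem.Dict.empty
        ((PySem.List.pyRange ((ar2.length : Int) - 1) (-1) (-1)).map
          (fun k => (PySem.List.pyGetD ar2 k 0, k))) := by
    rw [List.foldl_map]
  rw [key, PySem.Dict.getD_foldl_modify_append]
  have hrev : PySem.List.pyRange ((ar2.length : Int) - 1) (-1) (-1)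
      = (PySem.List.pyRange 0 (ar2.length : Int) 1).reverse := by
    rw [PySem.List.pyRange_neg_one_eq_reverse]; norm_num
  rw [hrev, PySem.List.enumerate_eq_map_pyRange ar2 0]
  simp [pvBucket, List.filter_map, List.map_map, Function.comp_def]

-- ===== VERDICT (by name: the statement is the Claim_ definition above) =====
theorem possiblePairsCount_spec : Claim_equal_possiblePairsCount := by
  intro ar1 n1 ar2 n2 _
  unfold Spec_possiblePairsCount possiblePairsCount possiblePairsCount_alt
  have h := pvRun ar1 0 (PySem.List.enumerate ar2) (pvBuild ar2)
    (PySem.List.pairwise_lt_enumerate ar2 0) (pvInv_build ar2)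
  rw [PySem.List.map_snd_enumerate ar2 0] at h
  exact h.symm
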